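-- pv_equiv track=rewrite | github.com/mariela7/PythonPractice | Ejercicios NO calificados.py | cambiaprimera
-- ===== SOURCE A (Python) =====
-- def cambiaprimera(cadena):
--     indice = 0
--     retorno=""
--     for letra in cadena:
--         #print (f'Indice: ',indice, ' Letra: ', letra, ' Cadena indice: ', cadena[indice])
--         if ((letra == cadena[0]) and (indice > 0)):
--             retorno = retorno + "$"
--             #print (f'SI -- Vuelta: ', indice, ' - retorno', retorno)
--         else:
--             retorno = retorno + letra
--             #print (f'NO -- Vuelta: ', indice, ' - retorno', retorno)
--         indice = indice + 1
--     return (retorno)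
-- ===== SOURCE B (Python) =====
-- def cambiaprimera(cadena):
--     if not cadena:
--         return ""
--     return cadena[0] + cadena[1:].replace(cadena[0], "$")
-- ===== Notes on version B (the rewrite author's own statement) =====
-- stated objective: simpler
-- what changed: Replaces the indexed char-by-char accumulation loop with a head/tail split and one bulk str.replace on the tail.
import Mathlib
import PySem

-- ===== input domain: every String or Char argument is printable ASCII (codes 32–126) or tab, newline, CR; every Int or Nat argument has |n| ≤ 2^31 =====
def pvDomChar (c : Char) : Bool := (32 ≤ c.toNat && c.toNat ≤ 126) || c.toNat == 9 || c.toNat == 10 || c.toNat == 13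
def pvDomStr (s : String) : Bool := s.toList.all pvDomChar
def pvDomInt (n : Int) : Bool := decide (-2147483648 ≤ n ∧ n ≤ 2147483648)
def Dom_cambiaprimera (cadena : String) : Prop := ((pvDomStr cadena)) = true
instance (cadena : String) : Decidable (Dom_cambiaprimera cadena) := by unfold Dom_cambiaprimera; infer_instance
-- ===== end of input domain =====

-- B replaces A's indexed char-by-char loop with a head/tail split and one bulk replace on the tail (simpler).

-- ===== PORT A =====
-- Literal port of A: loop over the characters, keeping the index and the accumulated
-- result; append '$' when the character equals cadena[0] and the index is positive.
def cambiaprimera (cadena : String) : String :=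
  String.ofList
    ((cadena.toList.foldl
        (fun (st : Int × List Char) (letra : Char) =>
          if (some letra == PySem.List.pyGet? cadena.toList 0) && decide (0 < st.1) then
            (st.1 + 1, st.2 ++ ['$'])
          else
            (st.1 + 1, st.2 ++ [letra]))
        (0, [])).2)

-- ===== PORT B =====
-- Literal port of B: empty-string guard, then cadena[0] + cadena[1:].replace(cadena[0], "$").
def cambiaprimera_alt (cadena : String) : String :=
  match cadena.toList with
  | [] => ""
  | c :: _ =>
    String.ofList [c] ++ PySem.Str.replace (PySem.Str.slice cadena (some 1) none) (String.ofList [c]) "$"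

-- ===== PRECONDITION & SPEC =====
def Spec_cambiaprimera (cadena : String) (out : String) : Prop := out = cambiaprimera_alt cadena
instance (cadena : String) (out : String) : Decidable (Spec_cambiaprimera cadena out) := by unfold Spec_cambiaprimera; infer_instance

-- ===== CLAIM (what is proved, stated in full; the proofs are below) =====
def Claim_equal_cambiaprimera : Prop := ∀ (cadena : String), Dom_cambiaprimera cadena → Spec_cambiaprimera cadena (cambiaprimera cadena)

-- ===== LEMMAS AND PROOFS =====

-- A's loop after the first character: the index stays positive, so each later
-- occurrence of the first character becomes '$'; the fold is an append of a map.
lemma pv_foldl_inv (c : Char) (l : List Char) : ∀ (n : Int) (acc : List Char), 1 ≤ n →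
    (l.foldl
        (fun (st : Int × List Char) (letra : Char) =>
          if (some letra == some c) && decide (0 < st.1) then
            (st.1 + 1, st.2 ++ ['$'])
          else
            (st.1 + 1, st.2 ++ [letra]))
        (n, acc)).2
      = acc ++ l.map (fun x => if x = c then '$' else x) := by
  induction l with
  | nil => intro n acc _; simp
  | cons x t ih =>
    intro n acc hn
    by_cases hx : x = c
    · subst hx
      rw [List.foldl_cons]
      have h1 : ((some x == some x) && decide (0 < n)) = true := by
        simp; omega
      rw [if_pos h1]
      rw [ih (n + 1) (acc ++ ['$']) (by omega)]
      simp
    · rw [List.foldl_cons]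
      rw [if_neg (by simp [hx])]
      rw [ih (n + 1) (acc ++ [x]) (by omega)]
      simp [hx]

-- Python's str.replace with a single-character pattern is a pointwise map.
lemma pv_replace_go_single (c d : Char) : ∀ (fuel : Nat) (l acc : List Char), l.length ≤ fuel →
    PySem.Chars.replace.go [c] [d] fuel l acc
      = acc.reverse ++ l.map (fun x => if x = c then d else x) := by
  intro fuel
  induction fuel with
  | zero =>
    intro l acc h
    have : l = [] := List.eq_nil_of_length_eq_zero (by omega)
    subst this
    simp [PySem.Chars.replace.go]
  | succ m ih =>
    intro l acc h
    cases l with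
    | nil => simp [PySem.Chars.replace.go]
    | cons x t =>
      rw [PySem.Chars.replace.go]
      by_cases hx : x = c
      · subst hx
        have hp : [x].isPrefixOf (x :: t) = true := by
          simp [List.isPrefixOf]
        rw [if_pos hp]
        simp only [List.length_cons] at h
        rw [ih _ _ (by simpa using h)]
        simp
      · have hp : [c].isPrefixOf (x :: t) = false := by
          simp [List.isPrefixOf]; exact fun h' => absurd h'.symm hx
        rw [hp]
        simp only [Bool.false_eq_true, if_false]
        simp only [List.length_cons] at h
        rw [ih _ _ (by omega)]
        simp [hx]

lemma pv_replace_single (c d : Char) (l : List Char) :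
    PySem.Chars.replace l [c] [d] = l.map (fun x => if x = c then d else x) := by
  rw [PySem.Chars.replace]
  simp only [List.isEmpty_cons, Bool.false_eq_true, if_false]
  rw [pv_replace_go_single c d l.length l [] le_rfl]
  simp

-- ===== VERDICT (by name: the statement is the Claim_ definition above) =====
theorem cambiaprimera_spec : Claim_equal_cambiaprimera := by
  intro cadena _
  unfold Spec_cambiaprimera cambiaprimera cambiaprimera_alt
  cases hcs : cadena.toList with
  | nil => rfl
  | cons c t =>
    -- A's side: first iteration takes the else branch (index 0), then the invariant.
    have hget : PySem.List.pyGet? (c :: t) 0 = some c := by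
      simp
    rw [List.foldl_cons]
    have h0 : ((some c == PySem.List.pyGet? (c :: t) 0) && decide ((0 : Int) < 0)) = false := by
      simp
    rw [h0]
    simp only [Bool.false_eq_true, if_false]
    have hA :
        ((t.foldl
            (fun (st : Int × List Char) (letra : Char) =>
              if (some letra == PySem.List.pyGet? (c :: t) 0) && decide (0 < st.1) then
                (st.1 + 1, st.2 ++ ['$'])
              else
                (st.1 + 1, st.2 ++ [letra]))
            ((0 : Int) + 1, [] ++ [c])).2)
          = [c] ++ t.map (fun x => if x = c then '$' else x) := by
      rw [hget]
      exact pv_foldl_inv c t 1 [c] le_rfl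
    rw [hA]
    -- B's side: the slice is the tail, the replace is the map.
    apply String.ext  -- equality of the underlying character lists
    simp only [String.toList_append, PySem.Str.toList_replace]
    have hsl : (PySem.Str.slice cadena (some 1) none).toList = t := by
      simp [PySem.Str.toList_slice, hcs, PySem.Chars.slice_eq_listSlice, PySem.List.slice_from_one]
    rw [hsl]
    have hc1 : (String.ofList [c]).toList = [c] := by simp
    have hd : ("$" : String).toList = ['$'] := rfl
    rw [hc1, hd, pv_replace_single]
    simp
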